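-- pv_equiv track=rewrite | github.com/xonmin/Algorithm | pythonProject/우테코/Q1.py | solution
-- ===== SOURCE A (Python) =====
-- def solution(arr):
--     answer = [0,0,0]
--
--     num_count = [arr.count(1),arr.count(2),arr.count(3)]
--
--     max_num = max(num_count)
--
--     for i in range(3):
--
--         add_number = max_num - num_count[i]
--         for _ in range(add_number):
--             answer[i] += 1
--
--     return answer
-- ===== SOURCE B (Python) =====
-- def solution(arr):
--     # Different algorithm: sort the relevant values once, then locate each of the
--     # three count boundaries by binary search (upper bound), instead of counting.
--     s = sorted(v for v in arr if 1 <= v <= 3)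
--     n = len(s)
--
--     def upper(x):
--         lo, hi = 0, n
--         while lo < hi:
--             mid = (lo + hi) // 2
--             if s[mid] <= x:
--                 lo = mid + 1
--             else:
--                 hi = mid
--         return lo
--
--     b1, b2, b3 = upper(1), upper(2), upper(3)
--     counts = [b1, b2 - b1, b3 - b2]
--     m = max(counts)
--     return [m - c for c in counts]
-- ===== Notes on version B (the rewrite author's own statement) =====
-- stated objective: alternative
-- what changed: B sorts the in-range (1..3) values once and finds the three count boundaries by hand-written binary search (upper bound), deriving counts as boundary differences and the answer as max-boundary arithmetic, instead of A's three .count scans plus unit-increment padding loops.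
import Mathlib
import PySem

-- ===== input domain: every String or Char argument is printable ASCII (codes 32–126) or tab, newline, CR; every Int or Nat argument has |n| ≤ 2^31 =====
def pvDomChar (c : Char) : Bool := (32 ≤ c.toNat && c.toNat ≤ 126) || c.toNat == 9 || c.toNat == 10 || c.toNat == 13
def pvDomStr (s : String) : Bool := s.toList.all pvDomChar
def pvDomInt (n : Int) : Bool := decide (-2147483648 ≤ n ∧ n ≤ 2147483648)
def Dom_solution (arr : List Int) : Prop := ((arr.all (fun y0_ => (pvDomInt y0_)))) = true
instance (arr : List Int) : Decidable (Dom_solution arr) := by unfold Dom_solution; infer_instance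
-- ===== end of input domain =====

-- B sorts the in-range values once and derives the three counts from binary-search
-- (upper-bound) boundaries, instead of A's three .count scans plus unit-increment loops.

-- ===== PORT A =====
def solution (arr : List Int) : List Int :=
  let answer : List Int := [0, 0, 0]
  let numCount : List Int :=
    [(PySem.List.count arr 1 : Int), (PySem.List.count arr 2 : Int), (PySem.List.count arr 3 : Int)]
  let maxNum : Int := (PySem.List.max? numCount (fun x => x)).getD 0
  (PySem.List.pyRange 0 3 1).foldl (fun a i =>
      let addNumber := maxNum - PySem.List.pyGetD numCount i 0
      (PySem.List.pyRange 0 addNumber 1).foldl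
        (fun a' _ => PySem.List.pySetD a' i (PySem.List.pyGetD a' i 0 + 1)) a) answer

-- ===== PORT B =====
-- Source B's inner 'upper' while-loop, transliterated (lo/hi/mid are Python ints;
-- the Nat fuel, initially hi-lo, only makes the loop total: it never cuts a real iteration).
def pvUpperGo (s : List Int) (x : Int) : Nat → Int → Int → Int
  | 0, lo, _ => lo
  | k + 1, lo, hi =>
    if lo < hi then
      let mid := PySem.Int.floordiv (lo + hi) 2
      if PySem.List.pyGetD s mid 0 ≤ x then pvUpperGo s x k (mid + 1) hi
      else pvUpperGo s x k lo mid
    else lo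

def pvUpper (s : List Int) (x : Int) (lo hi : Int) : Int :=
  pvUpperGo s x (hi - lo).toNat lo hi

def solution_alt (arr : List Int) : List Int :=
  let s : List Int :=
    PySem.List.sorted (arr.filter (fun v => decide (1 ≤ v ∧ v ≤ 3))) (fun v => v) false
  let n : Int := (s.length : Int)
  let b1 := pvUpper s 1 0 n
  let b2 := pvUpper s 2 0 n
  let b3 := pvUpper s 3 0 n
  let counts : List Int := [b1, b2 - b1, b3 - b2]
  let m : Int := (PySem.List.max? counts (fun x => x)).getD 0
  counts.map (fun c => m - c)

-- ===== PRECONDITION & SPEC =====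
def Spec_solution (arr : List Int) (out : List Int) : Prop := out = solution_alt arr
instance (arr : List Int) (out : List Int) : Decidable (Spec_solution arr out) := by unfold Spec_solution; infer_instance

-- ===== CLAIM (what is proved, stated in full; the proofs are below) =====
def Claim_equal_solution : Prop := ∀ (arr : List Int), Dom_solution arr → Spec_solution arr (solution arr)

-- ===== LEMMAS AND PROOFS =====

-- If the predicate holds exactly on the first k positions, countP is k.
theorem countP_of_prefix (s : List Int) (p : Int → Bool) (k : Nat) (hk : k ≤ s.length)
    (h1 : ∀ (j : Nat) (hj : j < s.length), j < k → p s[j] = true)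
    (h2 : ∀ (j : Nat) (hj : j < s.length), k ≤ j → p s[j] = false) :
    s.countP p = k := by
  have hsplit : s = s.take k ++ s.drop k := (List.take_append_drop k s).symm
  rw [hsplit, List.countP_append]
  have ht : (s.take k).countP p = (s.take k).length := by
    apply List.countP_eq_length.mpr
    intro a ha
    obtain ⟨j, hj, rfl⟩ := List.mem_iff_getElem.mp ha
    have hjl : j < s.length := by
      have := List.length_take_le k s; omega
    have hjk : j < k := by
      have : (s.take k).length = min k s.length := List.length_take
      omega
    rw [List.getElem_take]
    exact h1 j hjl hjk
  have hd : (s.drop k).countP p = 0 := by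
    apply List.countP_eq_zero.mpr
    intro a ha
    obtain ⟨j, hj, rfl⟩ := List.mem_iff_getElem.mp ha
    have hjl : k + j < s.length := by
      have : (s.drop k).length = s.length - k := List.length_drop
      omega
    rw [List.getElem_drop]
    simp [h2 (k + j) hjl (by omega)]
  rw [ht, hd, List.length_take]
  omega

-- The binary-search loop returns countP (· ≤ x) on a sorted list.
theorem pvUpperGo_correct (s : List Int) (hs : s.Pairwise (· ≤ ·)) (x : Int) :
    ∀ (k : Nat) (lo hi : Int), (hi - lo).toNat ≤ k → 0 ≤ lo → lo ≤ hi → hi ≤ (s.length : Int) →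
      (∀ (j : Nat) (hj : j < s.length), (j : Int) < lo → s[j] ≤ x) →
      (∀ (j : Nat) (hj : j < s.length), hi ≤ (j : Int) → x < s[j]) →
      pvUpperGo s x k lo hi = (s.countP (fun v => decide (v ≤ x)) : Int) := by
  have hpw := List.pairwise_iff_getElem.mp hs
  have hterm : ∀ (lo hi : Int), lo = hi → 0 ≤ lo → hi ≤ (s.length : Int) →
      (∀ (j : Nat) (hj : j < s.length), (j : Int) < lo → s[j] ≤ x) →
      (∀ (j : Nat) (hj : j < s.length), hi ≤ (j : Int) → x < s[j]) →
      lo = (s.countP (fun v => decide (v ≤ x)) : Int) := by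
    intro lo hi heq h0 hhi hlow hhigh
    subst heq
    have hcp : s.countP (fun v => decide (v ≤ x)) = lo.toNat := by
      apply countP_of_prefix s _ lo.toNat (by omega)
      · intro j hj hjlt
        simpa using hlow j hj (by omega)
      · intro j hj hjge
        simpa using hhigh j hj (by omega)
    rw [hcp]; omega
  intro k
  induction k with
  | zero =>
    intro lo hi hk h0 hlohi hhi hlow hhigh
    have : lo = hi := by omega
    exact hterm lo hi this h0 hhi hlow hhigh
  | succ k ih =>
    intro lo hi hk h0 hlohi hhi hlow hhigh
    by_cases h : lo < hi
    · have hmid1 : lo ≤ PySem.Int.floordiv (lo + hi) 2 :=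
        (PySem.Int.floordiv_two_mid_bounds (le_of_lt h)).1
      have hmid2 : PySem.Int.floordiv (lo + hi) 2 < hi :=
        (PySem.Int.floordiv_lt_iff_lt_mul (by omega)).2 (by omega)
      set mid := PySem.Int.floordiv (lo + hi) 2 with hmiddef
      have hmlen : mid < (s.length : Int) := lt_of_lt_of_le hmid2 hhi
      have hget : PySem.List.pyGetD s mid 0 = s[mid.toNat]'(by omega) :=
        PySem.List.pyGetD_eq_getElem s 0 (by omega) hmlen
      rw [pvUpperGo, if_pos h]
      show (if PySem.List.pyGetD s mid 0 ≤ x then pvUpperGo s x k (mid + 1) hi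
            else pvUpperGo s x k lo mid) = ((s.countP (fun v => decide (v ≤ x)) : Nat) : Int)
      rw [hget]
      by_cases hc : s[mid.toNat]'(by omega) ≤ x
      · rw [if_pos hc]
        apply ih (mid + 1) hi (by omega) (by omega) (by omega) hhi
        · intro j hj hjlt
          rcases Nat.lt_or_ge j mid.toNat with hl | hg
          · exact le_trans (hpw j mid.toNat hj (by omega) hl) hc
          · have : j = mid.toNat := by omega
            subst this; exact hc
        · exact hhigh
      · rw [if_neg hc]
        apply ih lo mid (by omega) h0 (by omega) (by omega) hlow
        intro j hj hjge
        rcases Nat.lt_or_ge mid.toNat j with hl | hg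
        · exact lt_of_lt_of_le (lt_of_not_ge hc) (hpw mid.toNat j (by omega) hj hl)
        · have : j = mid.toNat := by omega
          subst this; exact lt_of_not_ge hc
    · rw [pvUpperGo, if_neg h]
      exact hterm lo hi (by omega) h0 hhi hlow hhigh

-- pvUpper from 0 to length, on the sorted list, as a plain countP.
theorem pvUpper_eval (s : List Int) (hs : s.Pairwise (· ≤ ·)) (x : Int) :
    pvUpper s x 0 (s.length : Int) = (s.countP (fun v => decide (v ≤ x)) : Int) := by
  unfold pvUpper
  apply pvUpperGo_correct s hs x _ 0 (s.length : Int) (by omega) (by omega)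
    (by omega) (by omega)
  · intro j hj hjlt; omega
  · intro j hj hjge; exfalso; omega

-- The three boundary countPs of B, in terms of A's three counts.
theorem cp1 (l : List Int) :
    (l.filter (fun v => decide (1 ≤ v ∧ v ≤ 3))).countP (fun v => decide (v ≤ 1))
      = l.count 1 := by
  induction l with
  | nil => simp
  | cons a t ih =>
    rw [List.filter_cons, List.count_cons]
    by_cases h : 1 ≤ a ∧ a ≤ 3
    · rw [if_pos (by simpa using h), List.countP_cons, ih]
      by_cases h1 : a = 1
      · subst h1; simp
      · have hla : ¬ ((a : Int) ≤ 1) := by omega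
        simp [h1, hla]
    · rw [if_neg (by simpa using h), ih]
      have h1 : a ≠ 1 := by omega
      simp [h1]

theorem cp2 (l : List Int) :
    (l.filter (fun v => decide (1 ≤ v ∧ v ≤ 3))).countP (fun v => decide (v ≤ 2))
      = l.count 1 + l.count 2 := by
  induction l with
  | nil => simp
  | cons a t ih =>
    simp only [List.filter_cons, List.count_cons]
    by_cases h : 1 ≤ a ∧ a ≤ 3
    · rw [if_pos (by simpa using h), List.countP_cons, ih]
      by_cases h12 : a ≤ 2
      · have : (a = 1 ∧ a ≠ 2) ∨ (a = 2 ∧ a ≠ 1) := by omega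
        rcases this with ⟨rfl, _⟩ | ⟨rfl, _⟩ <;> simp <;> omega
      · have h1 : a ≠ 1 := by omega
        have h2 : a ≠ 2 := by omega
        simp [h1, h2, h12]
    · rw [if_neg (by simpa using h), ih]
      have h1 : a ≠ 1 := by omega
      have h2 : a ≠ 2 := by omega
      simp [h1, h2]

theorem cp3 (l : List Int) :
    (l.filter (fun v => decide (1 ≤ v ∧ v ≤ 3))).countP (fun v => decide (v ≤ 3))
      = l.count 1 + l.count 2 + l.count 3 := by
  induction l with
  | nil => simp
  | cons a t ih =>
    simp only [List.filter_cons, List.count_cons]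
    by_cases h : 1 ≤ a ∧ a ≤ 3
    · rw [if_pos (by simpa using h), List.countP_cons, ih]
      have : (a = 1 ∧ a ≠ 2 ∧ a ≠ 3) ∨ (a = 2 ∧ a ≠ 1 ∧ a ≠ 3) ∨ (a = 3 ∧ a ≠ 1 ∧ a ≠ 2) := by omega
      rcases this with ⟨rfl, _, _⟩ | ⟨rfl, _, _⟩ | ⟨rfl, _, _⟩ <;> simp <;> omega
    · rw [if_neg (by simpa using h), ih]
      have h1 : a ≠ 1 := by omega
      have h2 : a ≠ 2 := by omega
      have h3 : a ≠ 3 := by omega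
      simp [h1, h2, h3]

-- A's inner unit-increment loop at index 0/1/2 (closed form).
theorem inc0 (n : Nat) : ∀ (a b c : Int),
    (List.range n).foldl (fun l _ => PySem.List.pySetD l 0 (PySem.List.pyGetD l 0 0 + 1)) [a, b, c]
    = [a + n, b, c] := by
  induction n with
  | zero => intro a b c; simp
  | succ m ih =>
    intro a b c
    rw [List.range_succ, List.foldl_append, ih]
    simp [PySem.List.pySetD, PySem.List.pyGetD, PySem.List.pySet?, PySem.List.pyGet?, PySem.List.pyIdx?]
    ring

theorem inc1 (n : Nat) : ∀ (a b c : Int),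
    (List.range n).foldl (fun l _ => PySem.List.pySetD l 1 (PySem.List.pyGetD l 1 0 + 1)) [a, b, c]
    = [a, b + n, c] := by
  induction n with
  | zero => intro a b c; simp
  | succ m ih =>
    intro a b c
    rw [List.range_succ, List.foldl_append, ih]
    simp [PySem.List.pySetD, PySem.List.pyGetD, PySem.List.pySet?, PySem.List.pyGet?, PySem.List.pyIdx?]
    ring

theorem inc2 (n : Nat) : ∀ (a b c : Int),
    (List.range n).foldl (fun l _ => PySem.List.pySetD l 2 (PySem.List.pyGetD l 2 0 + 1)) [a, b, c]
    = [a, b, c + n] := by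
  induction n with
  | zero => intro a b c; simp
  | succ m ih =>
    intro a b c
    rw [List.range_succ, List.foldl_append, ih]
    simp [PySem.List.pySetD, PySem.List.pyGetD, PySem.List.pySet?, PySem.List.pyGet?, PySem.List.pyIdx?]
    ring

theorem pad0 (n : Int) (hn : 0 ≤ n) (a b c : Int) :
    (PySem.List.pyRange 0 n 1).foldl
      (fun l _ => PySem.List.pySetD l 0 (PySem.List.pyGetD l 0 0 + 1)) [a, b, c] = [a + n, b, c] := by
  rw [PySem.List.pyRange_one, List.foldl_map, inc0]
  congr 1
  omega

theorem pad1 (n : Int) (hn : 0 ≤ n) (a b c : Int) :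
    (PySem.List.pyRange 0 n 1).foldl
      (fun l _ => PySem.List.pySetD l 1 (PySem.List.pyGetD l 1 0 + 1)) [a, b, c] = [a, b + n, c] := by
  rw [PySem.List.pyRange_one, List.foldl_map, inc1]
  congr 2
  omega

theorem pad2 (n : Int) (hn : 0 ≤ n) (a b c : Int) :
    (PySem.List.pyRange 0 n 1).foldl
      (fun l _ => PySem.List.pySetD l 2 (PySem.List.pyGetD l 2 0 + 1)) [a, b, c] = [a, b, c + n] := by
  rw [PySem.List.pyRange_one, List.foldl_map, inc2]
  congr 3
  omega

-- ===== VERDICT (by name: the statement is the Claim_ definition above) =====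
theorem solution_spec : Claim_equal_solution := by
  intro arr _
  unfold Spec_solution
  simp only [solution, solution_alt]
  set F : List Int := arr.filter (fun v => decide (1 ≤ v ∧ v ≤ 3)) with hF
  set s : List Int := PySem.List.sorted F (fun v => v) false with hsdef
  have hs : s.Pairwise (· ≤ ·) := by
    simpa using PySem.List.sorted_pairwise F (fun v => v)
  have hperm : s.Perm F := PySem.List.sorted_perm F (fun v => v) false
  have hcpF : ∀ p : Int → Bool, s.countP p = F.countP p := fun p => hperm.countP_eq p
  have hb1 : pvUpper s 1 0 (s.length : Int) = ((arr.count 1 : Nat) : Int) := by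
    rw [pvUpper_eval s hs, hcpF, hF, cp1]
  have hb2 : pvUpper s 2 0 (s.length : Int) = ((arr.count 1 + arr.count 2 : Nat) : Int) := by
    rw [pvUpper_eval s hs, hcpF, hF, cp2]
  have hb3 : pvUpper s 3 0 (s.length : Int)
      = ((arr.count 1 + arr.count 2 + arr.count 3 : Nat) : Int) := by
    rw [pvUpper_eval s hs, hcpF, hF, cp3]
  rw [hb1, hb2, hb3]
  have e2 : ((arr.count 1 + arr.count 2 : Nat) : Int) - ((arr.count 1 : Nat) : Int)
      = ((arr.count 2 : Nat) : Int) := by push_cast; ring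
  have e3 : ((arr.count 1 + arr.count 2 + arr.count 3 : Nat) : Int)
      - ((arr.count 1 + arr.count 2 : Nat) : Int) = ((arr.count 3 : Nat) : Int) := by
    push_cast; ring
  rw [e2, e3]
  simp only [PySem.List.count_eq]
  set c1 : Int := ((List.count 1 arr : Nat) : Int) with hc1
  set c2 : Int := ((List.count 2 arr : Nat) : Int) with hc2
  set c3 : Int := ((List.count 3 arr : Nat) : Int) with hc3
  have h01 : (0:Int) ≤ c1 := by rw [hc1]; positivity
  have h02 : (0:Int) ≤ c2 := by rw [hc2]; positivity
  have h03 : (0:Int) ≤ c3 := by rw [hc3]; positivity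
  cases hmax : PySem.List.max? [c1, c2, c3] (fun x => x) with
  | none => exact absurd ((PySem.List.max?_eq_none_iff _ _).mp hmax) (by simp)
  | some m =>
    have hm1 : c1 ≤ m := PySem.List.max?_isMax hmax c1 (by simp)
    have hm2 : c2 ≤ m := PySem.List.max?_isMax hmax c2 (by simp)
    have hm3 : c3 ≤ m := PySem.List.max?_isMax hmax c3 (by simp)
    rw [show PySem.List.pyRange 0 3 1 = [0, 1, 2] from by decide]
    simp only [List.foldl_cons, List.foldl_nil, Option.getD_some, List.map]
    rw [show PySem.List.pyGetD [c1, c2, c3] 0 0 = c1 from by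
          norm_num [PySem.List.pyGetD, PySem.List.pyGet?, PySem.List.pyIdx?]; try rfl,
        show PySem.List.pyGetD [c1, c2, c3] 1 0 = c2 from by
          norm_num [PySem.List.pyGetD, PySem.List.pyGet?, PySem.List.pyIdx?]; try rfl,
        show PySem.List.pyGetD [c1, c2, c3] 2 0 = c3 from by
          norm_num [PySem.List.pyGetD, PySem.List.pyGet?, PySem.List.pyIdx?]; rfl]
    rw [pad0 (m - c1) (by omega), pad1 (m - c2) (by omega), pad2 (m - c3) (by omega)]
    norm_num
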